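-- pv_equiv track=rewrite | github.com/Space1415/secureai-dataloss | src/scripts/performance_benchmark.py | create_test_content
-- ===== SOURCE A (Python) =====
-- def create_test_content(size_kb: int) -> str:
--     """Create test content of specified size."""
--     base_content = """
--     Hello John Doe, my email is john@example.com and my phone number is 555-123-4567.
--     The API key is sk-1234567890abcdef1234567890abcdef12345678.
--     The JWT token is eyJhbGciOiJIUzI1NiIsInR5cCI6IkpXVCJ9.eyJzdWIiOiIxMjM0NTY3ODkwIiwibmFtZSI6IkpvaG4gRG9lIiwiaWF0IjoxNTE2MjM5MDIyfQ.SflKxwRJSMeKKF2QT4fwpMeJf36POk6yJV_adQssw5c.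
--     The database URL is postgresql://user:password123@localhost:5432/mydb.
--     """
--
--     # Repeat content to reach desired size
--     target_size = size_kb * 1024
--     content = ""
--     while len(content.encode()) < target_size:
--         content += base_content
--
--     return content[:target_size]
-- ===== SOURCE B (Python) =====
-- def create_test_content(size_kb: int) -> str:
--     """Create test content of specified size."""
--     base_content = """
--     Hello John Doe, my email is john@example.com and my phone number is 555-123-4567.
--     The API key is sk-1234567890abcdef1234567890abcdef12345678.
--     The JWT token is eyJhbGciOiJIUzI1NiIsInR5cCI6IkpXVCJ9.eyJzdWIiOiIxMjM0NTY3ODkwIiwibmFtZSI6IkpvaG4gRG9lIiwiaWF0IjoxNTE2MjM5MDIyfQ.SflKxwRJSMeKKF2QT4fwpMeJf36POk6yJV_adQssw5c.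
--     The database URL is postgresql://user:password123@localhost:5432/mydb.
--     """
--
--     target_size = size_kb * 1024
--     if target_size <= 0:
--         return ""
--     # base_content is ASCII, so byte length == character length; build in one shot
--     n = (target_size + len(base_content) - 1) // len(base_content)
--     return (base_content * n)[:target_size]
-- ===== Notes on version B (the rewrite author's own statement) =====
-- stated objective: faster
-- what changed: B replaces A's quadratic grow-and-re-encode loop (content += base, re-measuring len(content.encode()) each pass) with a closed-form repeat count: one ceiling division, one string multiplication, one slice (the content is ASCII, so bytes == chars).
import Mathlib
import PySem

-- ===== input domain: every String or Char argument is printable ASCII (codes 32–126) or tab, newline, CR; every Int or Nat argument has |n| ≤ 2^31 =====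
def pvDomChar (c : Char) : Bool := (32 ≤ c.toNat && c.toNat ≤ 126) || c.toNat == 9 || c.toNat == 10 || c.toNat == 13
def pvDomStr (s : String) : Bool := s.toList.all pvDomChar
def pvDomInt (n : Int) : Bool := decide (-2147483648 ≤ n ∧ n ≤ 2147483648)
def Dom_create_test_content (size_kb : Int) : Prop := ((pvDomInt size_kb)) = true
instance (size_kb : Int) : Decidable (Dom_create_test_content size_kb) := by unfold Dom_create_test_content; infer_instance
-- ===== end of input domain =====

-- B replaces A's quadratic grow-and-re-measure loop with a closed-form repeat count
-- (one ceiling division, one repetition, one slice); the content is ASCII so bytes == chars.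

-- ===== PORT A =====
-- the shared base_content literal (ASCII, 408 characters = 408 bytes)
def pvBase : List Char := "\n    Hello John Doe, my email is john@example.com and my phone number is 555-123-4567.\n    The API key is sk-1234567890abcdef1234567890abcdef12345678.\n    The JWT token is eyJhbGciOiJIUzI1NiIsInR5cCI6IkpXVCJ9.eyJzdWIiOiIxMjM0NTY3ODkwIiwibmFtZSI6IkpvaG4gRG9lIiwiaWF0IjoxNTE2MjM5MDIyfQ.SflKxwRJSMeKKF2QT4fwpMeJf36POk6yJV_adQssw5c.\n    The database URL is postgresql://user:password123@localhost:5432/mydb.\n    ".toList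

set_option maxRecDepth 4000 in
theorem pvBase_length : pvBase.length = 408 := by rfl

-- the while loop: content += base_content while len(content.encode()) < target
-- (pvBase is ASCII, so the encoded byte length equals the character count)
def pvLoopA (t : Int) (c : List Char) : List Char :=
  if (c.length : Int) < t then pvLoopA t (c ++ pvBase) else c
termination_by (t - c.length).toNat
decreasing_by
  simp only [List.length_append, pvBase_length]
  omega

def create_test_content (size_kb : Int) : String :=
  let target_size := size_kb * 1024
  String.ofList (PySem.List.slice (pvLoopA target_size []) none (some target_size))

-- ===== PORT B =====
def create_test_content_alt (size_kb : Int) : String :=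
  let target_size := size_kb * 1024
  if target_size ≤ 0 then ""
  else
    let n := PySem.Int.floordiv (target_size + (pvBase.length : Int) - 1) (pvBase.length : Int)
    String.ofList (PySem.List.slice ((List.replicate n.toNat pvBase).flatten) none (some target_size))

-- ===== PRECONDITION & SPEC =====
def Spec_create_test_content (size_kb : Int) (out : String) : Prop := out = create_test_content_alt size_kb
instance (size_kb : Int) (out : String) : Decidable (Spec_create_test_content size_kb out) := by unfold Spec_create_test_content; infer_instance

-- ===== CLAIM (what is proved, stated in full; the proofs are below) =====
def Claim_equal_create_test_content : Prop := ∀ (size_kb : Int), Dom_create_test_content size_kb → Spec_create_test_content size_kb (create_test_content size_kb)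

-- ===== LEMMAS AND PROOFS =====

-- number of iterations A's loop performs for target t, starting from ""
def pvN (t : Int) : Nat := if t ≤ 0 then 0 else (PySem.Int.floordiv (t + 407) 408).toNat

def pvRep (m : Nat) : List Char := (List.replicate m pvBase).flatten

theorem pvRep_length (m : Nat) : (pvRep m).length = m * 408 := by
  induction m with
  | zero => simp [pvRep]
  | succ k ih =>
    simp [pvRep, List.replicate_succ] at *
    simp [pvBase_length]
    omega

theorem pvRep_succ (m : Nat) : pvRep m ++ pvBase = pvRep (m + 1) := by
  induction m with
  | zero => simp [pvRep]
  | succ k ih =>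
    simp [pvRep, List.replicate_succ, List.flatten_cons, List.append_assoc] at *
    exact ih

theorem pvN_spec (t : Int) (ht : 0 < t) : t ≤ (pvN t : Int) * 408 ∧ ((pvN t : Int) - 1) * 408 < t := by
  have h : ¬ t ≤ 0 := by omega
  have hq : PySem.Int.floordiv (t + 407) 408 = (t + 407) / 408 :=
    PySem.Int.floordiv_eq_ediv_of_pos (by omega)
  have h1 := Int.mul_ediv_add_emod (t + 407) 408
  have h2 := Int.emod_nonneg (t + 407) (by omega : (408:Int) ≠ 0)
  have h3 := Int.emod_lt_of_pos (t + 407) (by omega : (0:Int) < 408)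
  have hnn : 0 ≤ (t + 407) / 408 := Int.ediv_nonneg (by omega) (by omega)
  simp only [pvN, h, if_false, hq]
  rw [Int.toNat_of_nonneg hnn]
  omega

theorem pvN_le_of_le (t : Int) (m : Nat) (h : t ≤ (m : Int) * 408) : pvN t ≤ m := by
  by_cases ht : 0 < t
  · have hs := (pvN_spec t ht).2
    by_contra hc
    push_cast at hs h
    omega
  · have ht0 : t ≤ 0 := by omega
    simp [pvN, ht0]

theorem lt_pvN_of_lt (t : Int) (m : Nat) (h : (m : Int) * 408 < t) : m < pvN t := by
  have ht : 0 < t := by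
    have : (0:Int) ≤ (m : Int) * 408 := by positivity
    omega
  have hs := (pvN_spec t ht).1
  by_contra hc
  push_cast at hs h
  omega

theorem pvLoop_rep (t : Int) : ∀ (fuel m : Nat), t ≤ ((m : Int) + fuel) * 408 →
    pvLoopA t (pvRep m) = pvRep (max m (pvN t)) := by
  intro fuel
  induction fuel with
  | zero =>
    intro m hm
    rw [pvLoopA]
    have hlen : ((pvRep m).length : Int) = (m : Int) * 408 := by
      rw [pvRep_length]; push_cast; ring
    have hnot : ¬ ((pvRep m).length : Int) < t := by
      rw [hlen]; push_cast at hm; omega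
    rw [if_neg hnot]
    have := pvN_le_of_le t m (by push_cast at hm; omega)
    congr 1
    omega
  | succ k ih =>
    intro m hm
    rw [pvLoopA]
    have hlen : ((pvRep m).length : Int) = (m : Int) * 408 := by
      rw [pvRep_length]; push_cast; ring
    by_cases hlt : ((pvRep m).length : Int) < t
    · rw [if_pos hlt, pvRep_succ]
      have hmN : m < pvN t := lt_pvN_of_lt t m (by rw [hlen] at hlt; exact hlt)
      rw [ih (m + 1) (by push_cast at hm ⊢; omega)]
      congr 1
      omega
    · rw [if_neg hlt]
      have := pvN_le_of_le t m (by rw [hlen] at hlt; omega)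
      congr 1
      omega

theorem pvLoopA_eq (t : Int) : pvLoopA t [] = pvRep (pvN t) := by
  have h0 : ([] : List Char) = pvRep 0 := by simp [pvRep]
  have hb : t ≤ ((0 : Int) + (pvN t : Int)) * 408 := by
    by_cases ht : 0 < t
    · have := (pvN_spec t ht).1; omega
    · have : (0:Int) ≤ (pvN t : Int) * 408 := by positivity
      omega
  rw [h0, pvLoop_rep t (pvN t) 0 hb]
  simp

theorem pvAlt_n (t : Int) (ht : ¬ t ≤ 0) :
    (PySem.Int.floordiv (t + (pvBase.length : Int) - 1) (pvBase.length : Int)).toNat = pvN t := by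
  have he : (t + 408 - 1 : Int) = t + 407 := by ring
  simp only [pvBase_length, pvN, ht, if_false]
  norm_num [he]

-- ===== VERDICT (by name: the statement is the Claim_ definition above) =====
theorem create_test_content_spec : Claim_equal_create_test_content := by
  intro size_kb _
  unfold Spec_create_test_content create_test_content create_test_content_alt
  simp only []
  rw [pvLoopA_eq]
  by_cases ht : size_kb * 1024 ≤ 0
  · rw [if_pos ht]
    have h0 : pvN (size_kb * 1024) = 0 := by simp [pvN, ht]
    rw [h0]
    have : pvRep 0 = [] := by simp [pvRep]
    rw [this]
    simp [PySem.List.slice]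
  · rw [if_neg ht, pvAlt_n _ ht]
    rfl
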